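-- pv_equiv track=rewrite | github.com/frankpietro/superbrain | tests/engine/test_clustering.py | _labels_equivalent_up_to_permutation
-- ===== SOURCE A (Python) =====
-- def _labels_equivalent_up_to_permutation(a: dict[str, int], b: dict[str, int]) -> bool:
--     """Two label maps are equivalent up to cluster-ID permutation iff they
--     induce the same partition of rows."""
--     if set(a.keys()) != set(b.keys()):
--         return False
--     grouping_a: dict[int, set[str]] = {}
--     for key, label in a.items():
--         grouping_a.setdefault(label, set()).add(key)
--     grouping_b: dict[int, set[str]] = {}
--     for key, label in b.items():
--         grouping_b.setdefault(label, set()).add(key)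
--     frozen_a = {frozenset(s) for s in grouping_a.values()}
--     frozen_b = {frozenset(s) for s in grouping_b.values()}
--     return frozen_a == frozen_b
-- ===== SOURCE B (Python) =====
-- def _labels_equivalent_up_to_permutation(a: dict[str, int], b: dict[str, int]) -> bool:
--     """Two label maps are equivalent up to cluster-ID permutation iff they
--     induce the same partition of rows."""
--     if set(a.keys()) != set(b.keys()):
--         return False
--     fwd: dict[int, int] = {}
--     bwd: dict[int, int] = {}
--     for key, la in a.items():
--         lb = b[key]
--         if la in fwd:
--             if fwd[la] != lb:
--                 return False
--         else:
--             fwd[la] = lb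
--         if lb in bwd:
--             if bwd[lb] != la:
--                 return False
--         else:
--             bwd[lb] = la
--     return True
-- ===== Notes on version B (the rewrite author's own statement) =====
-- stated objective: alternative
-- what changed: Instead of building both label->keyset groupings and comparing the two sets of frozensets, B makes one pass over a's items maintaining a forward (a-label -> b-label) and a backward (b-label -> a-label) translation dict, failing on the first inconsistency; the key-set guard is kept.
import Mathlib
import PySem

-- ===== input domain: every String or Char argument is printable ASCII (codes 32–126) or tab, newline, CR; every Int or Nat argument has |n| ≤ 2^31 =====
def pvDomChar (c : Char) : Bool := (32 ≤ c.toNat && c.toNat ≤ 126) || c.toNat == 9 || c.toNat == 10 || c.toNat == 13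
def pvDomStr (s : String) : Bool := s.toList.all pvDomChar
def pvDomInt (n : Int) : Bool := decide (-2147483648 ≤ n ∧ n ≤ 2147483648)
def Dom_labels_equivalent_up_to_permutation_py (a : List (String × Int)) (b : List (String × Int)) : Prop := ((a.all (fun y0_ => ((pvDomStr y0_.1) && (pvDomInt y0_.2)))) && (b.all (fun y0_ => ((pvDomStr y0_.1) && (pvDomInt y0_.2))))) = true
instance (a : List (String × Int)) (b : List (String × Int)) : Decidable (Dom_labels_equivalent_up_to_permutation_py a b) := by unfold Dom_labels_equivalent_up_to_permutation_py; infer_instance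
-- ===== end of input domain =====

-- B replaces A's "build both label→row-set groupings and compare the two sets of frozensets"
-- by a single pass over a's items maintaining a forward and a backward label-translation table.
-- Dicts are association lists; Pre_ restricts to lists with distinct keys (the dict invariant).

-- ===== PORT A =====
-- element-level BEq instance for a set of frozensets: frozensets compare by set equality
@[reducible] def pvI : BEq (PySem.Set String) := ⟨fun s t => PySem.Set.equal s t⟩

-- grouping.setdefault(label, set()).add(key)  (mutating the set in place) = Dict.modify label ∅ (·.add key)
def pvGroup (l : List (String × Int)) : PySem.Dict Int (PySem.Set String) :=
  l.foldl (fun d p => d.modify p.2 PySem.Set.empty (fun s => PySem.Set.add s p.1)) PySem.Dict.empty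

-- {frozenset(s) for s in grouping.values()}
def pvFrozen (l : List (String × Int)) : PySem.Set (PySem.Set String) :=
  @PySem.Set.ofList _ pvI (PySem.Dict.values (pvGroup l))

def labels_equivalent_up_to_permutation_py (a : List (String × Int)) (b : List (String × Int)) : Bool :=
  if PySem.Set.equal (PySem.Set.ofList (a.map Prod.fst)) (PySem.Set.ofList (b.map Prod.fst)) = false then
    false
  else
    @PySem.Set.equal _ pvI (pvFrozen a) (pvFrozen b)

-- ===== PORT B =====
-- b[key] on the dict b
def pvLook (b : List (String × Int)) (k : String) : Option Int :=
  (PySem.Dict.ofList b).get? k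

-- the loop "for key, la in a.items(): …" with the two translation tables fwd, bwd
def pvGo (b : List (String × Int)) : List (String × Int) → PySem.Dict Int Int → PySem.Dict Int Int → Bool
  | [], _, _ => true
  | (k, la) :: rest, fwd, bwd =>
    match pvLook b k with
    | none => false   -- unreachable: the key-set guard ensures k is a key of b
    | some lb =>
      let okF := match fwd.get? la with | some m => m == lb | none => true
      if okF = false then false else
        let fwd' := if (fwd.get? la).isSome then fwd else fwd.insert la lb
        let okB := match bwd.get? lb with | some l' => l' == la | none => true
        if okB = false then false else
          let bwd' := if (bwd.get? lb).isSome then bwd else bwd.insert lb la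
          pvGo b rest fwd' bwd'

def labels_equivalent_up_to_permutation_py_alt (a : List (String × Int)) (b : List (String × Int)) : Bool :=
  if PySem.Set.equal (PySem.Set.ofList (a.map Prod.fst)) (PySem.Set.ofList (b.map Prod.fst)) = false then
    false
  else
    pvGo b a PySem.Dict.empty PySem.Dict.empty

-- ===== PRECONDITION & SPEC =====
-- Pre_ excludes association lists with duplicate keys: a Python dict cannot contain them, so a
-- duplicate-key list does not uniquely represent a dict argument (a representational corner).
def Pre_labels_equivalent_up_to_permutation_py (a : List (String × Int)) (b : List (String × Int)) : Prop :=
  (a.map Prod.fst).Nodup ∧ (b.map Prod.fst).Nodup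
instance (a : List (String × Int)) (b : List (String × Int)) : Decidable (Pre_labels_equivalent_up_to_permutation_py a b) := by unfold Pre_labels_equivalent_up_to_permutation_py; infer_instance

def pvWitness_labels_equivalent_up_to_permutation_py : (List (String × Int)) × (List (String × Int)) :=
  ([("x", 1), ("y", 1), ("z", 2)], [("x", 5), ("y", 5), ("z", 7)])

def Spec_labels_equivalent_up_to_permutation_py (a : List (String × Int)) (b : List (String × Int)) (out : Bool) : Prop := out = labels_equivalent_up_to_permutation_py_alt a b
instance (a : List (String × Int)) (b : List (String × Int)) (out : Bool) : Decidable (Spec_labels_equivalent_up_to_permutation_py a b out) := by unfold Spec_labels_equivalent_up_to_permutation_py; infer_instance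

-- ===== CLAIM (what is proved, stated in full; the proofs are below) =====
def Claim_equal_labels_equivalent_up_to_permutation_py : Prop := ∀ (a : List (String × Int)) (b : List (String × Int)), Dom_labels_equivalent_up_to_permutation_py a b → Pre_labels_equivalent_up_to_permutation_py a b → Spec_labels_equivalent_up_to_permutation_py a b (labels_equivalent_up_to_permutation_py a b)

-- ===== LEMMAS AND PROOFS =====

-- both label maps induce the same equivalence of keys ("consistent")
def pvCons (l : List (String × Int)) (b : List (String × Int)) : Prop :=
  ∀ p ∈ l, ∀ q ∈ l, (p.2 = q.2 ↔ pvLook b p.1 = pvLook b q.1)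

-- the keys of l carrying label ℓ, in order
def pvClass (l : List (String × Int)) (ℓ : Int) : List String :=
  (l.filter (fun p => p.2 == ℓ)).map Prod.fst


lemma pvDict_items (b : List (String × Int)) (hb : (b.map Prod.fst).Nodup) :
    (PySem.Dict.ofList b).items = b := by
  have h := PySem.Dict.items_foldl_insert_fresh b Prod.fst Prod.snd PySem.Dict.empty
    (by intro a _; simp [PySem.Dict.contains_empty]) hb
  simpa [PySem.Dict.ofList, PySem.Dict.update] using h

lemma pvLook_eq_some_iff (b : List (String × Int)) (hb : (b.map Prod.fst).Nodup)
    (k : String) (v : Int) : pvLook b k = some v ↔ (k, v) ∈ b := by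
  have hk : (PySem.Dict.ofList b).keys.Nodup := by
    simpa [PySem.Dict.keys, pvDict_items b hb]
  rw [pvLook, PySem.Dict.get?_eq_some_iff_mem_items _ _ _ hk, pvDict_items b hb]

lemma pvLook_isSome_iff (b : List (String × Int)) (hb : (b.map Prod.fst).Nodup)
    (k : String) : (pvLook b k).isSome ↔ k ∈ b.map Prod.fst := by
  rw [pvLook, ← PySem.Dict.contains_eq_isSome_get?, PySem.Dict.contains_iff_mem_keys,
    PySem.Dict.keys, pvDict_items b hb]


lemma pvGroup_getD_aux (ℓ : Int) :
    ∀ (l : List (String × Int)) (d : PySem.Dict Int (PySem.Set String)),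
    (l.foldl (fun d p => d.modify p.2 PySem.Set.empty (fun s => PySem.Set.add s p.1)) d).getD ℓ PySem.Set.empty
      = (pvClass l ℓ).foldl PySem.Set.add (d.getD ℓ PySem.Set.empty) := by
  intro l
  induction l with
  | nil => intro d; simp [pvClass]
  | cons x xs ih =>
    intro d
    rw [List.foldl_cons, ih]
    by_cases h : x.2 = ℓ
    · simp [pvClass, h]
    · rw [PySem.Dict.getD_modify]; simp [pvClass, h, Ne.symm h]

lemma pvClass_nodup (l : List (String × Int)) (hl : (l.map Prod.fst).Nodup) (ℓ : Int) :
    (pvClass l ℓ).Nodup := by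
  have : (l.filter (fun p => p.2 == ℓ)).Sublist l := List.filter_sublist
  exact (this.map Prod.fst).nodup hl

lemma pvGroup_getD (l : List (String × Int)) (ℓ : Int) (hl : (l.map Prod.fst).Nodup) :
    (pvGroup l).getD ℓ PySem.Set.empty = pvClass l ℓ := by
  rw [pvGroup, pvGroup_getD_aux, PySem.Dict.getD_empty]
  rw [show (PySem.Set.empty : PySem.Set String) = [] from rfl, ← PySem.Set.ofList_eq_foldl]
  exact PySem.Set.ofList_eq_self_of_nodup _ (pvClass_nodup l hl ℓ)

lemma pvGroup_values (l : List (String × Int)) (hl : (l.map Prod.fst).Nodup) :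
    (pvGroup l).values = (PySem.Set.ofList (l.map Prod.snd)).map (fun ℓ => pvClass l ℓ) := by
  have hkeys : (pvGroup l).keys = PySem.Set.ofList (l.map Prod.snd) := by
    have h := PySem.Dict.keys_foldl_modify_key l Prod.snd PySem.Set.empty
      (fun _ p s => PySem.Set.add s p.1) PySem.Dict.empty
    simpa [pvGroup, PySem.Dict.keys_empty, PySem.Set.update_nil_left] using h
  have hnd : (pvGroup l).keys.Nodup := by
    rw [hkeys]; exact PySem.Set.nodup_ofList _
  rw [PySem.Dict.values_eq_map_keys _ hnd PySem.Set.empty, hkeys]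
  exact List.map_congr_left (fun ℓ _ => pvGroup_getD l ℓ hl)

lemma mem_pvClass (l : List (String × Int)) (ℓ : Int) (x : String) :
    x ∈ pvClass l ℓ ↔ (x, ℓ) ∈ l := by
  simp only [pvClass, List.mem_map, List.mem_filter]
  constructor
  · rintro ⟨p, ⟨hp, hl⟩, rfl⟩
    have : p = (p.1, ℓ) := by
      have := beq_iff_eq.mp hl; rw [← this]
    rwa [← this]
  · intro h; exact ⟨(x, ℓ), ⟨h, by simp⟩, rfl⟩

lemma pvE_symm {s t : PySem.Set String} (h : PySem.Set.equal s t = true) :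
    PySem.Set.equal t s = true := by
  rw [PySem.Set.equal_iff] at *
  intro x; exact (h x).symm

lemma pvE_trans {s t u : PySem.Set String} (h1 : PySem.Set.equal s t = true)
    (h2 : PySem.Set.equal t u = true) : PySem.Set.equal s u = true := by
  rw [PySem.Set.equal_iff] at *
  intro x; exact (h1 x).trans (h2 x)

-- with the frozenset BEq instance, membership testing is `any (Set.equal x ·)`
lemma pvContainsE (l : List (PySem.Set String)) (x : PySem.Set String) :
    @PySem.Set.contains _ pvI l x = l.any (fun y => PySem.Set.equal x y) := by
  induction l with
  | nil => rfl
  | cons y ys ih =>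
    rw [show @PySem.Set.contains _ pvI (y :: ys) x
        = (match PySem.Set.equal x y with | true => true | false => @List.elem _ pvI x ys) from rfl,
      List.any_cons]
    cases h : PySem.Set.equal x y
    · simpa using ih
    · rfl

lemma pvAnyE_add (s : List (PySem.Set String)) (y x : PySem.Set String) :
    (@PySem.Set.add _ pvI s y).any (fun z => PySem.Set.equal x z)
      = (s.any (fun z => PySem.Set.equal x z) || PySem.Set.equal x y) := by
  show (if @PySem.Set.contains _ pvI s y = true then s else s ++ [y]).any _ = _
  by_cases h : @PySem.Set.contains _ pvI s y = true
  · simp only [h, if_true]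
    rw [pvContainsE] at h
    rcases List.any_eq_true.mp h with ⟨z, hz, hyz⟩
    by_cases hxy : PySem.Set.equal x y = true
    · have hxz : PySem.Set.equal x z = true := pvE_trans hxy hyz
      have hany : s.any (fun z => PySem.Set.equal x z) = true := List.any_eq_true.mpr ⟨z, hz, hxz⟩
      simp [hany, hxy]
    · simp [Bool.eq_false_iff.mpr hxy]
  · rw [if_neg h]; simp [List.any_append]

lemma pvAnyE_ofList (xs : List (PySem.Set String)) (x : PySem.Set String) :
    (@PySem.Set.ofList _ pvI xs).any (fun z => PySem.Set.equal x z)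
      = xs.any (fun z => PySem.Set.equal x z) := by
  suffices h : ∀ (s : List (PySem.Set String)),
      (xs.foldl (@PySem.Set.add _ pvI) s).any (fun z => PySem.Set.equal x z)
        = (s.any (fun z => PySem.Set.equal x z) || xs.any (fun z => PySem.Set.equal x z)) by
    have h0 := h []
    simpa [PySem.Set.ofList, PySem.Set.empty] using h0
  induction xs with
  | nil => intro s; simp
  | cons y ys ih =>
    intro s
    rw [List.foldl_cons, ih, pvAnyE_add, List.any_cons]
    cases s.any (fun z => PySem.Set.equal x z) <;> cases PySem.Set.equal x y <;> simp

lemma pvMem_ofListE (xs : List (PySem.Set String)) (y : PySem.Set String)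
    (h : y ∈ @PySem.Set.ofList _ pvI xs) : y ∈ xs := by
  suffices hgen : ∀ (s : List (PySem.Set String)), y ∈ xs.foldl (@PySem.Set.add _ pvI) s → y ∈ s ∨ y ∈ xs by
    rcases hgen [] h with h' | h'
    · cases h'
    · exact h'
  clear h
  induction xs with
  | nil => intro s hs; exact Or.inl hs
  | cons z zs ih =>
    intro s hs
    rw [List.foldl_cons] at hs
    rcases ih _ hs with h' | h'
    · simp only [PySem.Set.add] at h'
      split at h'
      · exact Or.inl h'
      · rcases List.mem_append.mp h' with h'' | h''
        · exact Or.inl h''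
        · simp at h''; simp [h'']
    · simp [h']

lemma pvFrozen_equal_iff (va vb : List (PySem.Set String)) :
    @PySem.Set.equal _ pvI (@PySem.Set.ofList _ pvI va) (@PySem.Set.ofList _ pvI vb) = true ↔
    ((∀ s ∈ va, ∃ t ∈ vb, PySem.Set.equal s t = true) ∧
     (∀ t ∈ vb, ∃ s ∈ va, PySem.Set.equal s t = true)) := by
  have hmain : ∀ (u v : List (PySem.Set String)),
      @PySem.Set.issubset _ pvI (@PySem.Set.ofList _ pvI u) (@PySem.Set.ofList _ pvI v) = true ↔
      ∀ s ∈ u, ∃ t ∈ v, PySem.Set.equal s t = true := by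
    intro u v
    show List.all _ _ = true ↔ _
    rw [List.all_eq_true]
    constructor
    · intro h s hs
      have hrep : (@PySem.Set.ofList _ pvI u).any (fun z => PySem.Set.equal s z) = true := by
        rw [pvAnyE_ofList]
        exact List.any_eq_true.mpr ⟨s, hs, by rw [PySem.Set.equal_iff]; intro x; rfl⟩
      rcases List.any_eq_true.mp hrep with ⟨s', hs', hss'⟩
      have := h s' hs'
      rw [pvContainsE, pvAnyE_ofList] at this
      rcases List.any_eq_true.mp this with ⟨t, ht, hst⟩
      exact ⟨t, ht, pvE_trans hss' hst⟩
    · intro h s hs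
      have hs' : s ∈ u := pvMem_ofListE u s hs
      rcases h s hs' with ⟨t, ht, hst⟩
      rw [pvContainsE, pvAnyE_ofList]
      exact List.any_eq_true.mpr ⟨t, ht, hst⟩
  constructor
  · intro h
    have h1 := (Bool.and_eq_true _ _).mp h
    exact ⟨(hmain va vb).mp h1.1, fun t ht => by
      rcases (hmain vb va).mp h1.2 t ht with ⟨s, hs, hts⟩
      exact ⟨s, hs, pvE_symm hts⟩⟩
  · rintro ⟨h1, h2⟩
    show (_ && _) = true
    rw [Bool.and_eq_true]
    refine ⟨(hmain va vb).mpr h1, (hmain vb va).mpr ?_⟩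
    intro t ht
    rcases h2 t ht with ⟨s, hs, hst⟩
    exact ⟨s, hs, pvE_symm hst⟩



lemma pvNodup_snd_eq {l : List (String × Int)} (h : (l.map Prod.fst).Nodup)
    {k : String} {v w : Int} (hv : (k, v) ∈ l) (hw : (k, w) ∈ l) : v = w := by
  induction l with
  | nil => cases hv
  | cons x xs ih =>
    rw [List.map_cons, List.nodup_cons] at h
    rcases List.mem_cons.mp hv with hv1 | hv'
    · subst hv1
      rcases List.mem_cons.mp hw with hw1 | hw'
      · exact (congrArg Prod.snd hw1).symm
      · exact absurd (List.mem_map.mpr ⟨(k, w), hw', rfl⟩) h.1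
    · rcases List.mem_cons.mp hw with hw1 | hw'
      · subst hw1
        exact absurd (List.mem_map.mpr ⟨(k, v), hv', rfl⟩) h.1
      · exact ih h.2 hv' hw'

lemma pvMemFst {l : List (String × Int)} {k : String} (h : k ∈ l.map Prod.fst) :
    ∃ v, (k, v) ∈ l := by
  rcases List.mem_map.mp h with ⟨p, hp, he⟩
  obtain ⟨pf, ps⟩ := p
  cases he
  exact ⟨ps, hp⟩

lemma pvMemB (a b : List (String × Int)) (hk : ∀ k, k ∈ a.map Prod.fst ↔ k ∈ b.map Prod.fst)
    {k : String} {ℓ : Int} (hka : (k, ℓ) ∈ a) : ∃ m, (k, m) ∈ b := by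
  exact pvMemFst ((hk k).mp (List.mem_map.mpr ⟨(k, ℓ), hka, rfl⟩))

lemma pvCons_class (a b : List (String × Int))
    (hb : (b.map Prod.fst).Nodup)
    (hk : ∀ k, k ∈ a.map Prod.fst ↔ k ∈ b.map Prod.fst)
    (hc : pvCons a b) {k : String} {ℓ m : Int}
    (hka : (k, ℓ) ∈ a) (hkb : (k, m) ∈ b) :
    ∀ x, x ∈ pvClass a ℓ ↔ x ∈ pvClass b m := by
  intro x
  rw [mem_pvClass, mem_pvClass]
  constructor
  · intro hx
    have h1 := (hc (x, ℓ) hx (k, ℓ) hka).mp rfl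
    have h2 : pvLook b k = some m := (pvLook_eq_some_iff b hb k m).mpr hkb
    exact (pvLook_eq_some_iff b hb x m).mp (h1.trans h2)
  · intro hx
    have hxb : x ∈ b.map Prod.fst := List.mem_map.mpr ⟨(x, m), hx, rfl⟩
    obtain ⟨ps, hp⟩ := pvMemFst ((hk x).mpr hxb)
    have h1 : pvLook b x = some m := (pvLook_eq_some_iff b hb x m).mpr hx
    have h2 : pvLook b k = some m := (pvLook_eq_some_iff b hb k m).mpr hkb
    have h3 : ps = ℓ := (hc (x, ps) hp (k, ℓ) hka).mpr (h1.trans h2.symm)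
    rwa [h3] at hp

lemma pvClasses_iff_cons (a b : List (String × Int))
    (ha : (a.map Prod.fst).Nodup) (hb : (b.map Prod.fst).Nodup)
    (hk : ∀ k, k ∈ a.map Prod.fst ↔ k ∈ b.map Prod.fst) :
    ((∀ ℓ ∈ a.map Prod.snd, ∃ m ∈ b.map Prod.snd, ∀ x, x ∈ pvClass a ℓ ↔ x ∈ pvClass b m) ∧
     (∀ m ∈ b.map Prod.snd, ∃ ℓ ∈ a.map Prod.snd, ∀ x, x ∈ pvClass a ℓ ↔ x ∈ pvClass b m)) ↔
    pvCons a b := by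
  constructor
  · rintro ⟨h1, h2⟩ ⟨kp, lp⟩ hp ⟨kq, lq⟩ hq
    obtain ⟨mp, hmp⟩ := pvMemB a b hk hp
    obtain ⟨mq, hmq⟩ := pvMemB a b hk hq
    have lookp : pvLook b kp = some mp := (pvLook_eq_some_iff b hb kp mp).mpr hmp
    have lookq : pvLook b kq = some mq := (pvLook_eq_some_iff b hb kq mq).mpr hmq
    simp only
    constructor
    · intro hl
      rcases h1 lp (List.mem_map.mpr ⟨(kp, lp), hp, rfl⟩) with ⟨m, _, hsame⟩
      have hkp : kp ∈ pvClass b m :=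
        (hsame kp).mp ((mem_pvClass a lp kp).mpr hp)
      have hkq : kq ∈ pvClass b m :=
        (hsame kq).mp ((mem_pvClass a lp kq).mpr (hl ▸ hq))
      have e1 : mp = m := pvNodup_snd_eq hb hmp ((mem_pvClass b m kp).mp hkp)
      have e2 : mq = m := pvNodup_snd_eq hb hmq ((mem_pvClass b m kq).mp hkq)
      rw [lookp, lookq, e1, e2]
    · intro hlook
      rw [lookp, lookq] at hlook
      have e0 : mp = mq := Option.some.inj hlook
      rcases h2 mp (List.mem_map.mpr ⟨(kp, mp), hmp, rfl⟩) with ⟨ℓ, _, hsame⟩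
      have hkp : kp ∈ pvClass a ℓ :=
        (hsame kp).mpr ((mem_pvClass b mp kp).mpr hmp)
      have hkq : kq ∈ pvClass a ℓ :=
        (hsame kq).mpr ((mem_pvClass b mp kq).mpr (e0 ▸ hmq))
      have e1 : lp = ℓ := pvNodup_snd_eq ha hp ((mem_pvClass a ℓ kp).mp hkp)
      have e2 : lq = ℓ := pvNodup_snd_eq ha hq ((mem_pvClass a ℓ kq).mp hkq)
      rw [e1, e2]
  · intro hc
    constructor
    · intro ℓ hl
      rcases List.mem_map.mp hl with ⟨p, hp, he⟩
      obtain ⟨pf, ps⟩ := p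
      cases he
      obtain ⟨m, hm⟩ := pvMemB a b hk hp
      exact ⟨m, List.mem_map.mpr ⟨(pf, m), hm, rfl⟩, pvCons_class a b hb hk hc hp hm⟩
    · intro m hm
      rcases List.mem_map.mp hm with ⟨q, hq, he⟩
      obtain ⟨qf, qs⟩ := q
      cases he
      obtain ⟨ps, hp⟩ := pvMemFst ((hk qf).mpr (List.mem_map.mpr ⟨(qf, qs), hq, rfl⟩))
      exact ⟨ps, List.mem_map.mpr ⟨(qf, ps), hp, rfl⟩, pvCons_class a b hb hk hc hp hq⟩



def pvInvF (b done : List (String × Int)) (fwd : PySem.Dict Int Int) : Prop :=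
  ∀ ℓ m, fwd.get? ℓ = some m ↔ ∃ k, (k, ℓ) ∈ done ∧ pvLook b k = some m
def pvInvB (b done : List (String × Int)) (bwd : PySem.Dict Int Int) : Prop :=
  ∀ m ℓ, bwd.get? m = some ℓ ↔ ∃ k, (k, ℓ) ∈ done ∧ pvLook b k = some m

lemma pvCons_snoc {b done : List (String × Int)} {k : String} {la m : Int}
    (hcons : pvCons done b) (hm : pvLook b k = some m)
    (hnew : ∀ p ∈ done, (p.2 = la ↔ pvLook b p.1 = some m)) :
    pvCons (done ++ [(k, la)]) b := by
  intro p hp q hq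
  rcases List.mem_append.mp hp with hp' | hp' <;> rcases List.mem_append.mp hq with hq' | hq'
  · exact hcons p hp' q hq'
  · simp only [List.mem_singleton] at hq'; subst hq'
    simpa [hm] using hnew p hp'
  · simp only [List.mem_singleton] at hp'; subst hp'
    simp only
    rw [hm]
    exact ⟨fun h => ((hnew q hq').mp h.symm).symm, fun h => (((hnew q hq').mpr h.symm)).symm⟩
  · simp only [List.mem_singleton] at hp' hq'; subst hp'; subst hq'
    exact ⟨fun _ => rfl, fun _ => rfl⟩

lemma pvInvF_snoc_keep {b done : List (String × Int)} {k : String} {la m : Int}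
    {fwd : PySem.Dict Int Int} (hfwd : pvInvF b done fwd)
    (hf : fwd.get? la = some m) (hm : pvLook b k = some m) :
    pvInvF b (done ++ [(k, la)]) fwd := by
  intro ℓ m0
  rw [hfwd ℓ m0]
  constructor
  · rintro ⟨k0, h1, h2⟩; exact ⟨k0, List.mem_append_left _ h1, h2⟩
  · rintro ⟨k0, h1, h2⟩
    rcases List.mem_append.mp h1 with h1' | h1'
    · exact ⟨k0, h1', h2⟩
    · simp only [List.mem_singleton, Prod.mk.injEq] at h1'
      have h3 : m0 = m := by rw [h1'.1, hm] at h2; exact (Option.some.inj h2).symm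
      exact (hfwd ℓ m0).mp (by rw [h1'.2, hf, h3])

lemma pvInvF_snoc_ins {b done : List (String × Int)} {k : String} {la m : Int}
    {fwd : PySem.Dict Int Int} (hfwd : pvInvF b done fwd)
    (hf : fwd.get? la = none) (hm : pvLook b k = some m) :
    pvInvF b (done ++ [(k, la)]) (fwd.insert la m) := by
  intro ℓ m0
  rw [PySem.Dict.get?_insert]
  by_cases hl : ℓ = la
  · subst hl
    rw [if_pos rfl]
    constructor
    · intro h; obtain rfl := Option.some.inj h
      exact ⟨k, List.mem_append_right _ (by simp), hm⟩
    · rintro ⟨k0, h1, h2⟩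
      rcases List.mem_append.mp h1 with h1' | h1'
      · exact absurd ((hfwd ℓ m0).mpr ⟨k0, h1', h2⟩) (by rw [hf]; simp)
      · simp only [List.mem_singleton, Prod.mk.injEq] at h1'
        obtain ⟨rfl, -⟩ := h1'
        rw [hm] at h2; rw [h2]
  · rw [if_neg hl, hfwd ℓ m0]
    constructor
    · rintro ⟨k0, h1, h2⟩; exact ⟨k0, List.mem_append_left _ h1, h2⟩
    · rintro ⟨k0, h1, h2⟩
      rcases List.mem_append.mp h1 with h1' | h1'
      · exact ⟨k0, h1', h2⟩
      · simp only [List.mem_singleton, Prod.mk.injEq] at h1'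
        exact absurd h1'.2 hl

lemma pvInvB_snoc_keep {b done : List (String × Int)} {k : String} {la m : Int}
    {bwd : PySem.Dict Int Int} (hbwd : pvInvB b done bwd)
    (hg : bwd.get? m = some la) (hm : pvLook b k = some m) :
    pvInvB b (done ++ [(k, la)]) bwd := by
  intro m0 ℓ
  rw [hbwd m0 ℓ]
  constructor
  · rintro ⟨k0, h1, h2⟩; exact ⟨k0, List.mem_append_left _ h1, h2⟩
  · rintro ⟨k0, h1, h2⟩
    rcases List.mem_append.mp h1 with h1' | h1'
    · exact ⟨k0, h1', h2⟩
    · simp only [List.mem_singleton, Prod.mk.injEq] at h1'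
      have h3 : m0 = m := by rw [h1'.1, hm] at h2; exact (Option.some.inj h2).symm
      exact (hbwd m0 ℓ).mp (by rw [h1'.2, h3, hg])

lemma pvInvB_snoc_ins {b done : List (String × Int)} {k : String} {la m : Int}
    {bwd : PySem.Dict Int Int} (hbwd : pvInvB b done bwd)
    (hg : bwd.get? m = none) (hm : pvLook b k = some m) :
    pvInvB b (done ++ [(k, la)]) (bwd.insert m la) := by
  intro m0 ℓ
  rw [PySem.Dict.get?_insert]
  by_cases hl : m0 = m
  · subst hl
    rw [if_pos rfl]
    constructor
    · intro h; obtain rfl := Option.some.inj h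
      exact ⟨k, List.mem_append_right _ (by simp), hm⟩
    · rintro ⟨k0, h1, h2⟩
      rcases List.mem_append.mp h1 with h1' | h1'
      · exact absurd ((hbwd m0 ℓ).mpr ⟨k0, h1', h2⟩) (by rw [hg]; simp)
      · simp only [List.mem_singleton, Prod.mk.injEq] at h1'
        rw [h1'.2]
  · rw [if_neg hl, hbwd m0 ℓ]
    constructor
    · rintro ⟨k0, h1, h2⟩; exact ⟨k0, List.mem_append_left _ h1, h2⟩
    · rintro ⟨k0, h1, h2⟩
      rcases List.mem_append.mp h1 with h1' | h1'
      · exact ⟨k0, h1', h2⟩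
      · simp only [List.mem_singleton, Prod.mk.injEq] at h1'
        have h3 : m0 = m := by rw [h1'.1, hm] at h2; exact (Option.some.inj h2).symm
        exact absurd h3 hl

-- the per-element condition needed to extend pvCons by (k, la)
lemma pvHnew_to_some {b done : List (String × Int)} {la m m' : Int}
    {fwd : PySem.Dict Int Int} (hfwd : pvInvF b done fwd)
    (hsome : ∀ p ∈ done, (pvLook b p.1).isSome)
    (hf : fwd.get? la = some m') (hmm : m' = m) :
    ∀ p ∈ done, p.2 = la → pvLook b p.1 = some m := by
  intro p hp hpl
  obtain ⟨mp, hmp⟩ := Option.isSome_iff_exists.mp (hsome p hp)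
  have hpd : (p.1, la) ∈ done := by rw [← hpl]; simpa using hp
  have h4 : fwd.get? la = some mp := (hfwd la mp).mpr ⟨p.1, hpd, hmp⟩
  rw [hf] at h4
  obtain rfl := Option.some.inj h4
  rw [hmp, hmm]

lemma pvHnew_to_none {b done : List (String × Int)} {la m : Int}
    {fwd : PySem.Dict Int Int} (hfwd : pvInvF b done fwd)
    (hsome : ∀ p ∈ done, (pvLook b p.1).isSome)
    (hf : fwd.get? la = none) :
    ∀ p ∈ done, p.2 = la → pvLook b p.1 = some m := by
  intro p hp hpl
  obtain ⟨mp, hmp⟩ := Option.isSome_iff_exists.mp (hsome p hp)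
  have hpd : (p.1, la) ∈ done := by rw [← hpl]; simpa using hp
  have : fwd.get? la = some mp := (hfwd la mp).mpr ⟨p.1, hpd, hmp⟩
  rw [hf] at this; cases this

lemma pvHnew_from_some {b done : List (String × Int)} {la m ℓ' : Int}
    {bwd : PySem.Dict Int Int} (hbwd : pvInvB b done bwd)
    (hg : bwd.get? m = some ℓ') (hll : ℓ' = la) :
    ∀ p ∈ done, pvLook b p.1 = some m → p.2 = la := by
  intro p hp hpl
  have hb : bwd.get? m = some p.2 := (hbwd m p.2).mpr ⟨p.1, by simpa using hp, hpl⟩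
  rw [hg] at hb
  rw [← Option.some.inj hb, hll]

lemma pvHnew_from_none {b done : List (String × Int)} {la m : Int}
    {bwd : PySem.Dict Int Int} (hbwd : pvInvB b done bwd)
    (hg : bwd.get? m = none) :
    ∀ p ∈ done, pvLook b p.1 = some m → p.2 = la := by
  intro p hp hpl
  have hb : bwd.get? m = some p.2 := (hbwd m p.2).mpr ⟨p.1, by simpa using hp, hpl⟩
  rw [hg] at hb; cases hb

-- failure cases refute consistency of the whole list
lemma pvFfail {b done rest : List (String × Int)} {k : String} {la m m' : Int}
    {fwd : PySem.Dict Int Int} (hfwd : pvInvF b done fwd)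
    (hf : fwd.get? la = some m') (hne : ¬ m' = m) (hm : pvLook b k = some m) :
    ¬ pvCons (done ++ (k, la) :: rest) b := by
  intro hc
  obtain ⟨k', hk'd, hk'l⟩ := (hfwd la m').mp hf
  have h := (hc (k', la) (List.mem_append_left _ hk'd) (k, la)
    (List.mem_append_right _ (by simp))).mp rfl
  rw [hk'l, hm] at h
  exact hne (Option.some.inj h)

lemma pvBfail {b done rest : List (String × Int)} {k : String} {la m ℓ' : Int}
    {bwd : PySem.Dict Int Int} (hbwd : pvInvB b done bwd)
    (hg : bwd.get? m = some ℓ') (hne : ¬ ℓ' = la) (hm : pvLook b k = some m) :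
    ¬ pvCons (done ++ (k, la) :: rest) b := by
  intro hc
  obtain ⟨k', hk'd, hk'l⟩ := (hbwd m ℓ').mp hg
  have h := (hc (k', ℓ') (List.mem_append_left _ hk'd) (k, la)
    (List.mem_append_right _ (by simp))).mpr (by rw [hk'l, hm])
  exact hne h

lemma pvGo_spec (b : List (String × Int)) :
    ∀ (rest done : List (String × Int)) (fwd bwd : PySem.Dict Int Int),
    (∀ p ∈ done ++ rest, (pvLook b p.1).isSome) →
    pvCons done b →
    pvInvF b done fwd → pvInvB b done bwd →
    (pvGo b rest fwd bwd = true ↔ pvCons (done ++ rest) b) := by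
  intro rest
  induction rest with
  | nil =>
    intro done fwd bwd hsome hcons hfwd hbwd
    rw [List.append_nil]
    exact iff_of_true (by simp [pvGo]) hcons
  | cons x rest ih =>
    obtain ⟨k, la⟩ := x
    intro done fwd bwd hsome hcons hfwd hbwd
    have hsd : ∀ p ∈ done, (pvLook b p.1).isSome :=
      fun p hp => hsome p (List.mem_append_left _ hp)
    have hk : (pvLook b k).isSome := hsome (k, la) (by simp)
    obtain ⟨m, hm⟩ := Option.isSome_iff_exists.mp hk
    have hsome' : ∀ p ∈ (done ++ [(k, la)]) ++ rest, (pvLook b p.1).isSome := by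
      intro p hp
      apply hsome
      simpa [List.append_assoc] using hp
    have happ : done ++ (k, la) :: rest = (done ++ [(k, la)]) ++ rest := by simp
    simp only [pvGo]
    rw [hm]
    cases hf : fwd.get? la with
    | some m' =>
      by_cases hmm : m' = m
      · have hto : ∀ p ∈ done, p.2 = la → pvLook b p.1 = some m :=
          pvHnew_to_some hfwd hsd hf hmm
        have hf' : fwd.get? la = some m := hmm ▸ hf
        simp only [hmm, beq_self_eq_true, Bool.true_eq_false, if_false, Option.isSome_some,
          if_true]
        cases hg : bwd.get? m with
        | some ℓ' =>
          by_cases hll : ℓ' = la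
          · simp only [hll, beq_self_eq_true, Bool.true_eq_false, if_false, Option.isSome_some,
              if_true]
            have hcons' : pvCons (done ++ [(k, la)]) b :=
              pvCons_snoc hcons hm (fun p hp =>
                ⟨hto p hp, pvHnew_from_some hbwd hg hll p hp⟩)
            rw [happ]
            exact ih _ fwd bwd hsome' hcons' (pvInvF_snoc_keep hfwd hf' hm)
              (pvInvB_snoc_keep hbwd (hll ▸ hg) hm)
          · have hbeq : (ℓ' == la) = false := by simp [hll]
            exact iff_of_false (by simp [hbeq]) (pvBfail hbwd hg hll hm)
        | none =>
          simp only [Bool.true_eq_false, if_false, Option.isSome_none]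
          have hcons' : pvCons (done ++ [(k, la)]) b :=
            pvCons_snoc hcons hm (fun p hp =>
              ⟨hto p hp, pvHnew_from_none hbwd hg p hp⟩)
          rw [happ]
          exact ih _ fwd _ hsome' hcons' (pvInvF_snoc_keep hfwd hf' hm)
            (pvInvB_snoc_ins hbwd hg hm)
      · have hbeq : (m' == m) = false := by simp [hmm]
        exact iff_of_false (by simp [hbeq]) (pvFfail hfwd hf hmm hm)
    | none =>
      have hto : ∀ p ∈ done, p.2 = la → pvLook b p.1 = some m :=
        pvHnew_to_none hfwd hsd hf
      simp only [Bool.true_eq_false, if_false, Option.isSome_none]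
      cases hg : bwd.get? m with
      | some ℓ' =>
        by_cases hll : ℓ' = la
        · simp only [hll, beq_self_eq_true, Bool.true_eq_false, if_false, Option.isSome_some,
            if_true]
          have hcons' : pvCons (done ++ [(k, la)]) b :=
            pvCons_snoc hcons hm (fun p hp =>
              ⟨hto p hp, pvHnew_from_some hbwd hg hll p hp⟩)
          rw [happ]
          exact ih _ _ bwd hsome' hcons' (pvInvF_snoc_ins hfwd hf hm)
            (pvInvB_snoc_keep hbwd (hll ▸ hg) hm)
        · have hbeq : (ℓ' == la) = false := by simp [hll]
          exact iff_of_false (by simp [hbeq]) (pvBfail hbwd hg hll hm)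
      | none =>
        simp only [Bool.true_eq_false, if_false, Option.isSome_none]
        have hcons' : pvCons (done ++ [(k, la)]) b :=
          pvCons_snoc hcons hm (fun p hp =>
            ⟨hto p hp, pvHnew_from_none hbwd hg p hp⟩)
        rw [happ]
        exact ih _ _ _ hsome' hcons' (pvInvF_snoc_ins hfwd hf hm)
          (pvInvB_snoc_ins hbwd hg hm)

lemma pvGuard_iff (xs ys : List String) :
    PySem.Set.equal (PySem.Set.ofList xs) (PySem.Set.ofList ys) = true ↔
    ∀ k, k ∈ xs ↔ k ∈ ys := by
  rw [PySem.Set.equal_iff]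
  constructor
  · intro h k; simpa [PySem.Set.mem_ofList] using h k
  · intro h k; simpa [PySem.Set.mem_ofList] using h k

lemma pvA_iff (a b : List (String × Int))
    (ha : (a.map Prod.fst).Nodup) (hb : (b.map Prod.fst).Nodup)
    (hk : ∀ k, k ∈ a.map Prod.fst ↔ k ∈ b.map Prod.fst) :
    (@PySem.Set.equal _ pvI (pvFrozen a) (pvFrozen b) = true) ↔ pvCons a b := by
  rw [pvFrozen, pvFrozen, pvFrozen_equal_iff, ← pvClasses_iff_cons a b ha hb hk]
  rw [pvGroup_values a ha, pvGroup_values b hb]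
  constructor
  · rintro ⟨h1, h2⟩
    constructor
    · intro ℓ hl
      rcases h1 (pvClass a ℓ)
        (List.mem_map.mpr ⟨ℓ, (PySem.Set.mem_ofList _ _).mpr hl, rfl⟩) with ⟨t, ht, heq⟩
      rcases List.mem_map.mp ht with ⟨m, hm, rfl⟩
      exact ⟨m, (PySem.Set.mem_ofList _ _).mp hm, (PySem.Set.equal_iff _ _).mp heq⟩
    · intro m hm
      rcases h2 (pvClass b m)
        (List.mem_map.mpr ⟨m, (PySem.Set.mem_ofList _ _).mpr hm, rfl⟩) with ⟨s, hs, heq⟩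
      rcases List.mem_map.mp hs with ⟨ℓ, hl, rfl⟩
      exact ⟨ℓ, (PySem.Set.mem_ofList _ _).mp hl, (PySem.Set.equal_iff _ _).mp heq⟩
  · rintro ⟨h1, h2⟩
    constructor
    · intro s hs
      rcases List.mem_map.mp hs with ⟨ℓ, hl, rfl⟩
      rcases h1 ℓ ((PySem.Set.mem_ofList _ _).mp hl) with ⟨m, hm, heq⟩
      exact ⟨pvClass b m, List.mem_map.mpr ⟨m, (PySem.Set.mem_ofList _ _).mpr hm, rfl⟩,
        (PySem.Set.equal_iff _ _).mpr heq⟩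
    · intro t ht
      rcases List.mem_map.mp ht with ⟨m, hm, rfl⟩
      rcases h2 m ((PySem.Set.mem_ofList _ _).mp hm) with ⟨ℓ, hl, heq⟩
      exact ⟨pvClass a ℓ, List.mem_map.mpr ⟨ℓ, (PySem.Set.mem_ofList _ _).mpr hl, rfl⟩,
        (PySem.Set.equal_iff _ _).mpr heq⟩

lemma pvB_iff (a b : List (String × Int))
    (hb : (b.map Prod.fst).Nodup)
    (hk : ∀ k, k ∈ a.map Prod.fst ↔ k ∈ b.map Prod.fst) :
    (pvGo b a PySem.Dict.empty PySem.Dict.empty = true) ↔ pvCons a b := by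
  have h := pvGo_spec b a [] PySem.Dict.empty PySem.Dict.empty
    (by
      intro p hp
      rw [List.nil_append] at hp
      rw [pvLook_isSome_iff b hb]
      exact (hk p.1).mp (List.mem_map.mpr ⟨p, hp, rfl⟩))
    (by intro p hp; cases hp)
    (by
      intro ℓ m
      rw [PySem.Dict.get?_empty]
      constructor
      · intro h; cases h
      · rintro ⟨k, hk', -⟩; cases hk')
    (by
      intro m ℓ
      rw [PySem.Dict.get?_empty]
      constructor
      · intro h; cases h
      · rintro ⟨k, hk', -⟩; cases hk')
  rwa [List.nil_append] at h

-- ===== VERDICT (by name: the statement is the Claim_ definition above) =====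
theorem labels_equivalent_up_to_permutation_py_spec : Claim_equal_labels_equivalent_up_to_permutation_py := by
  unfold Claim_equal_labels_equivalent_up_to_permutation_py
  intro a b _ hpre
  obtain ⟨ha, hb⟩ := hpre
  unfold Spec_labels_equivalent_up_to_permutation_py
  unfold labels_equivalent_up_to_permutation_py labels_equivalent_up_to_permutation_py_alt
  cases hguard : PySem.Set.equal (PySem.Set.ofList (a.map Prod.fst)) (PySem.Set.ofList (b.map Prod.fst)) with
  | false => rw [if_pos rfl, if_pos rfl]
  | true =>
    rw [if_neg (by simp), if_neg (by simp)]
    have hk : ∀ k, k ∈ a.map Prod.fst ↔ k ∈ b.map Prod.fst := (pvGuard_iff _ _).mp hguard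
    have hA := pvA_iff a b ha hb hk
    have hB := pvB_iff a b hb hk
    exact Bool.eq_iff_iff.mpr (by rw [hA, hB])
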